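-- pv_equiv track=rewrite | github.com/anilakash/IndKGC | utils/encode_triplets.py | entity2rel2entity
-- ===== SOURCE A (Python) =====
-- from collections import defaultdict
--
-- def entity2rel2entity(train):
--     h2rt = defaultdict(list)
--     h2r2t = defaultdict(dict)
--     for triplet in train:
--         h = triplet[0]
--         t = triplet[1]
--         r = triplet[2]
--         h2rt[h].append((r,t))
--
--     for h, rt in h2rt.items():
--         r2t = defaultdict(list)
--         for items in rt:
--             r2t[items[0]].append(items[1])
--         h2r2t[h].update(r2t)
--     return h2r2t
-- ===== SOURCE B (Python) =====
-- from collections import defaultdict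
--
-- def entity2rel2entity(train):
--     # One pass: build the nested head -> rel -> tails dict directly,
--     # without A's intermediate h2rt grouping and second regrouping loop.
--     h2r2t = defaultdict(dict)
--     for triplet in train:
--         h = triplet[0]
--         t = triplet[1]
--         r = triplet[2]
--         h2r2t[h].setdefault(r, []).append(t)
--     return h2r2t
-- ===== Notes on version B (the rewrite author's own statement) =====
-- stated objective: simpler
-- what changed: B builds the nested head->rel->tails dict directly in a single pass with setdefault/append, eliminating A's intermediate h2rt list-grouping dict and its entire second regrouping loop.
import Mathlib
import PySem

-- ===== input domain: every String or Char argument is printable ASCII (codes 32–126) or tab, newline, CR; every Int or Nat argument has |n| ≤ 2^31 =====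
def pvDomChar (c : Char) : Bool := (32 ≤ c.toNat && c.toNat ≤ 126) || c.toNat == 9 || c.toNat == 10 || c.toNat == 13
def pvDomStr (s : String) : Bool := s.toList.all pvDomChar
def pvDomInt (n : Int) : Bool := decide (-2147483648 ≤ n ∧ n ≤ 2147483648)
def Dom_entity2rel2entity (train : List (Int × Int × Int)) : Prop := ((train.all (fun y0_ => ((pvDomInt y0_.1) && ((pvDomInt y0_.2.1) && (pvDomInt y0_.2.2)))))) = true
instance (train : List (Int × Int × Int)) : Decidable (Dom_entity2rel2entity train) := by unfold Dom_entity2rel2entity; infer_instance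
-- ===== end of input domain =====

-- B builds the nested dict in one pass (setdefault/append), dropping A's intermediate
-- h2rt grouping dict and its second regrouping loop; return value equivalence proved.

-- ===== PORT A =====
def entity2rel2entity (train : List (Int × Int × Int)) : List (Int × List (Int × List Int)) :=
  let h2rt : PySem.Dict Int (List (Int × Int)) :=
    train.foldl (fun d trip => d.modify trip.1 [] (· ++ [(trip.2.2, trip.2.1)])) PySem.Dict.empty
  let h2r2t : PySem.Dict Int (PySem.Dict Int (List Int)) :=
    h2rt.items.foldl (fun acc p =>
      let r2t : PySem.Dict Int (List Int) :=
        p.2.foldl (fun d q => d.modify q.1 [] (· ++ [q.2])) PySem.Dict.empty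
      acc.insert p.1 ((acc.getD p.1 PySem.Dict.empty).update r2t.items)) PySem.Dict.empty
  h2r2t.items.map (fun p => (p.1, p.2.items))

-- ===== PORT B =====
def entity2rel2entity_alt (train : List (Int × Int × Int)) : List (Int × List (Int × List Int)) :=
  (train.foldl (fun d trip =>
      d.modify trip.1 PySem.Dict.empty (fun inner => inner.modify trip.2.2 [] (· ++ [trip.2.1])))
    PySem.Dict.empty).items.map (fun p => (p.1, p.2.items))

-- ===== PRECONDITION & SPEC =====
def Spec_entity2rel2entity (train : List (Int × Int × Int)) (out : List (Int × List (Int × List Int))) : Prop := out = entity2rel2entity_alt train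
instance (train : List (Int × Int × Int)) (out : List (Int × List (Int × List Int))) : Decidable (Spec_entity2rel2entity train out) := by unfold Spec_entity2rel2entity; infer_instance

-- ===== CLAIM (what is proved, stated in full; the proofs are below) =====
def Claim_equal_entity2rel2entity : Prop := ∀ (train : List (Int × Int × Int)), Dom_entity2rel2entity train → Spec_entity2rel2entity train (entity2rel2entity train)

-- ===== LEMMAS AND PROOFS =====

-- the inner relation->tails grouping both programs perform
def groupInner (rt : List (Int × Int)) : PySem.Dict Int (List Int) :=
  rt.foldl (fun d q => d.modify q.1 [] (· ++ [q.2])) PySem.Dict.empty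

def pairsOf (h : Int) (train : List (Int × Int × Int)) : List (Int × Int) :=
  (train.filter (fun trip => trip.1 == h)).map (fun trip => (trip.2.2, trip.2.1))

-- A's first loop, characterised
lemma h2rt_getD (train : List (Int × Int × Int)) (h : Int) :
    (train.foldl (fun d trip => d.modify trip.1 [] (· ++ [(trip.2.2, trip.2.1)]))
      (PySem.Dict.empty : PySem.Dict Int (List (Int × Int)))).getD h []
    = pairsOf h train := by
  have H := PySem.Dict.getD_foldl_modify_append
    (train.map fun trip => (trip.1, (trip.2.2, trip.2.1)))
    (PySem.Dict.empty : PySem.Dict Int (List (Int × Int))) h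
  simp only [List.foldl_map] at H
  refine H.trans ?_
  simp [pairsOf, List.filter_map, Function.comp_def]

lemma h2rt_keys (train : List (Int × Int × Int)) :
    (train.foldl (fun d trip => d.modify trip.1 [] (· ++ [(trip.2.2, trip.2.1)]))
      (PySem.Dict.empty : PySem.Dict Int (List (Int × Int)))).keys
    = PySem.Set.ofList (train.map (·.1)) := by
  have H := PySem.Dict.keys_foldl_modify_key train (fun trip => trip.1)
    ([] : List (Int × Int)) (fun _ trip => (· ++ [(trip.2.2, trip.2.1)])) PySem.Dict.empty
  refine H.trans ?_
  simp [PySem.Dict.keys_empty, PySem.Set.update_nil_left]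

-- B's loop, characterised
lemma bfold_getD (train : List (Int × Int × Int))
    (d : PySem.Dict Int (PySem.Dict Int (List Int))) (h : Int) :
    (train.foldl (fun d trip =>
      d.modify trip.1 PySem.Dict.empty (fun inner => inner.modify trip.2.2 [] (· ++ [trip.2.1]))) d).getD h PySem.Dict.empty
    = (train.filter (fun trip => trip.1 == h)).foldl
        (fun inner trip => inner.modify trip.2.2 [] (· ++ [trip.2.1])) (d.getD h PySem.Dict.empty) := by
  induction train generalizing d with
  | nil => rfl
  | cons trip rest ih =>
    simp only [List.foldl_cons, List.filter_cons]
    rw [ih]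
    by_cases hc : trip.1 = h
    · simp [hc]
    · simp [hc, PySem.Dict.getD_modify, Ne.symm hc]

lemma bfold_keys (train : List (Int × Int × Int)) :
    (train.foldl (fun d trip =>
      d.modify trip.1 PySem.Dict.empty (fun inner => inner.modify trip.2.2 [] (· ++ [trip.2.1])))
      (PySem.Dict.empty : PySem.Dict Int (PySem.Dict Int (List Int)))).keys
    = PySem.Set.ofList (train.map (·.1)) := by
  have H := PySem.Dict.keys_foldl_modify_key train (fun trip => trip.1)
    (PySem.Dict.empty : PySem.Dict Int (List Int))
    (fun _ trip => fun inner => inner.modify trip.2.2 [] (· ++ [trip.2.1])) PySem.Dict.empty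
  refine H.trans ?_
  simp [PySem.Dict.keys_empty, PySem.Set.update_nil_left]

lemma groupInner_nodup_keys (rt : List (Int × Int)) : (groupInner rt).keys.Nodup := by
  exact PySem.Dict.nodup_keys_foldl_modify_key rt (fun q => q.1) [] (fun _ q => (· ++ [q.2]))
    PySem.Dict.empty (by simp [PySem.Dict.keys_empty])

lemma update_empty_items (g : PySem.Dict Int (List Int)) (hg : g.keys.Nodup) :
    ((PySem.Dict.empty : PySem.Dict Int (List Int)).update g.items).items = g.items := by
  have H := PySem.Dict.items_foldl_insert_fresh g.items (fun p => p.1) (fun p => p.2)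
    (PySem.Dict.empty : PySem.Dict Int (List Int))
    (by intro a _; simp [PySem.Dict.contains_empty]) hg
  refine H.trans ?_
  simp [PySem.Dict.empty]

-- A's second loop over distinct fresh keys
lemma phase2 (l : List (Int × List (Int × Int))) (acc : PySem.Dict Int (PySem.Dict Int (List Int)))
    (hnd : (l.map (·.1)).Nodup) (hfresh : ∀ p ∈ l, acc.contains p.1 = false) :
    (l.foldl (fun acc p =>
      acc.insert p.1 ((acc.getD p.1 PySem.Dict.empty).update
        (p.2.foldl (fun d q => d.modify q.1 [] (· ++ [q.2])) PySem.Dict.empty).items)) acc).items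
    = acc.items ++ l.map (fun p => (p.1,
        (PySem.Dict.empty.update (groupInner p.2).items : PySem.Dict Int (List Int)))) := by
  induction l generalizing acc with
  | nil => simp
  | cons p rest ih =>
    simp only [List.map_cons, List.nodup_cons] at hnd
    have hp : acc.contains p.1 = false := hfresh p (List.mem_cons_self ..)
    simp only [List.foldl_cons]
    rw [ih _ hnd.2 ?fresh]
    case fresh =>
      intro q hq
      rw [PySem.Dict.contains_insert]
      have h1 : (q.1 == p.1) = false := by
        simp only [beq_eq_false_iff_ne, ne_eq]
        intro h; exact hnd.1 (h ▸ List.mem_map_of_mem hq)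
      rw [h1, hfresh q (List.mem_cons_of_mem _ hq)]
      rfl
    rw [PySem.Dict.items_insert_of_not_contains _ _ hp,
        PySem.Dict.getD_of_not_contains _ _ hp]
    simp [groupInner]


lemma A_out (train : List (Int × Int × Int)) :
    entity2rel2entity train
    = (PySem.Set.ofList (train.map (·.1))).map
        (fun h => (h, (groupInner (pairsOf h train)).items)) := by
  have hrfl : entity2rel2entity train
      = ((train.foldl (fun d trip => d.modify trip.1 [] (· ++ [(trip.2.2, trip.2.1)]))
          (PySem.Dict.empty : PySem.Dict Int (List (Int × Int)))).items.foldl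
          (fun acc p => acc.insert p.1 ((acc.getD p.1 PySem.Dict.empty).update
            (p.2.foldl (fun d q => d.modify q.1 [] (· ++ [q.2])) PySem.Dict.empty).items))
          (PySem.Dict.empty : PySem.Dict Int (PySem.Dict Int (List Int)))).items.map
          (fun p => (p.1, p.2.items)) := rfl
  rw [hrfl]
  set h2rt := train.foldl (fun d trip => d.modify trip.1 [] (· ++ [(trip.2.2, trip.2.1)]))
      (PySem.Dict.empty : PySem.Dict Int (List (Int × Int))) with hh2rt
  have hnd : h2rt.keys.Nodup := PySem.Dict.nodup_keys_foldl_modify_key train (fun trip => trip.1)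
      [] (fun _ trip => (· ++ [(trip.2.2, trip.2.1)])) PySem.Dict.empty
      (by simp [PySem.Dict.keys_empty])
  have hitems : h2rt.items
      = (PySem.Set.ofList (train.map (·.1))).map (fun k => (k, pairsOf k train)) := by
    rw [PySem.Dict.items_eq_map_keys _ hnd []]
    rw [hh2rt, h2rt_keys]
    exact List.map_congr_left (fun k _ => by rw [h2rt_getD])
  rw [phase2 h2rt.items PySem.Dict.empty hnd (by intro p _; simp [PySem.Dict.contains_empty])]
  rw [hitems]
  simp only [List.map_map,
    show (PySem.Dict.empty : PySem.Dict Int (PySem.Dict Int (List Int))).items = [] from rfl,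
    List.nil_append]
  refine List.map_congr_left ?_
  intro k _
  simp only [Function.comp_apply]
  rw [update_empty_items _ (groupInner_nodup_keys _)]

lemma B_out (train : List (Int × Int × Int)) :
    entity2rel2entity_alt train
    = (PySem.Set.ofList (train.map (·.1))).map
        (fun h => (h, (groupInner (pairsOf h train)).items)) := by
  unfold entity2rel2entity_alt
  set B := train.foldl (fun d trip =>
      d.modify trip.1 PySem.Dict.empty (fun inner => inner.modify trip.2.2 [] (· ++ [trip.2.1])))
      (PySem.Dict.empty : PySem.Dict Int (PySem.Dict Int (List Int))) with hB
  have hnd : B.keys.Nodup := PySem.Dict.nodup_keys_foldl_modify_key train (fun trip => trip.1)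
      PySem.Dict.empty (fun _ trip => fun inner => inner.modify trip.2.2 [] (· ++ [trip.2.1]))
      PySem.Dict.empty (by simp [PySem.Dict.keys_empty])
  rw [PySem.Dict.items_eq_map_keys _ hnd PySem.Dict.empty]
  rw [hB, bfold_keys]
  rw [List.map_map]
  refine List.map_congr_left ?_
  intro k _
  simp only [Function.comp_apply]
  rw [bfold_getD]
  simp only [groupInner, pairsOf, List.foldl_map]
  rfl

-- ===== VERDICT (by name: the statement is the Claim_ definition above) =====
theorem entity2rel2entity_spec : Claim_equal_entity2rel2entity := by
  intro train _
  unfold Spec_entity2rel2entity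
  rw [A_out, B_out]
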